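-- pv_equiv track=rewrite | github.com/ms2ag16/Graduate-Algorithm- | Google/Match String.py | check
-- ===== SOURCE A (Python) =====
-- def check(str1, str2):
--   set1=set(str1)
--   set2=set(str2)
--   if len(set2)<len(set1):
--     return False
--   for char in set1:
--     if char not in set2:
--       return False
--   return True
-- ===== SOURCE B (Python) =====
-- def check(str1, str2):
--   remaining = set(str1)
--   for char in str2:
--     remaining.discard(char)
--     if not remaining:
--       return True
--   return len(remaining) == 0
-- ===== Notes on version B (the rewrite author's own statement) =====
-- stated objective: alternative
-- what changed: B traverses str2 while shrinking a set of still-needed characters (early exit once empty), instead of A's build-both-sets-then-membership-test loop over set(str1) with a length pre-check.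
import Mathlib
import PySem

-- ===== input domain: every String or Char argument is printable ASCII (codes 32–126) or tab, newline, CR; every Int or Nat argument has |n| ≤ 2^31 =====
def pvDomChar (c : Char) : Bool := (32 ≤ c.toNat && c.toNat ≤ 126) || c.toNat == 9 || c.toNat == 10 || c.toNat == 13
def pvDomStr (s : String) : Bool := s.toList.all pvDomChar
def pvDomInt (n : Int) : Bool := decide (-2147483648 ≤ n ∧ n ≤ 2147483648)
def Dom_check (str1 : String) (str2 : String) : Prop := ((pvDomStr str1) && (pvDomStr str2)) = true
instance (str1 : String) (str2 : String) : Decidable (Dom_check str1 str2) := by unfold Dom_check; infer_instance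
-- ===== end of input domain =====

-- B traverses str2 while shrinking a set of still-needed characters (early exit once
-- empty), instead of A's membership-test loop over set(str1); same cost, alternative structure.

-- ===== PORT A =====
-- the 'for char in set1: if char not in set2: return False' loop (result is order-independent)
def checkLoopA (set2 : PySem.Set Char) : List Char → Bool
  | [] => true
  | c :: rest => if PySem.Set.contains set2 c then checkLoopA set2 rest else false

def check (str1 : String) (str2 : String) : Bool :=
  let set1 := PySem.Set.ofList str1.toList
  let set2 := PySem.Set.ofList str2.toList
  if PySem.Set.len set2 < PySem.Set.len set1 then false
  else checkLoopA set2 set1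

-- ===== PORT B =====
-- the 'for char in str2: remaining.discard(char); if not remaining: return True' loop
def checkLoopB (remaining : PySem.Set Char) : List Char → Bool
  | [] => decide (PySem.Set.len remaining == 0)
  | c :: rest =>
      let r := PySem.Set.discard remaining c
      if r.isEmpty then true else checkLoopB r rest

def check_alt (str1 : String) (str2 : String) : Bool :=
  checkLoopB (PySem.Set.ofList str1.toList) str2.toList

-- ===== PRECONDITION & SPEC =====
def Spec_check (str1 : String) (str2 : String) (out : Bool) : Prop := out = check_alt str1 str2
instance (str1 : String) (str2 : String) (out : Bool) : Decidable (Spec_check str1 str2 out) := by unfold Spec_check; infer_instance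

-- ===== CLAIM (what is proved, stated in full; the proofs are below) =====
def Claim_equal_check : Prop := ∀ (str1 : String) (str2 : String), Dom_check str1 str2 → Spec_check str1 str2 (check str1 str2)

-- ===== LEMMAS AND PROOFS =====

-- A's inner loop decides "every element of l is in set2"
theorem checkLoopA_eq (set2 : PySem.Set Char) (l : List Char) :
    checkLoopA set2 l = decide (∀ x ∈ l, x ∈ set2) := by
  induction l with
  | nil => simp [checkLoopA]
  | cons c rest ih =>
      simp only [checkLoopA, ih, PySem.Set.contains]
      by_cases h : c ∈ set2 <;> simp [h]

-- B's loop decides "every element of remaining is in cs", provided remaining has no duplicates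
theorem checkLoopB_eq (cs : List Char) (r : PySem.Set Char) (hr : r.Nodup) :
    checkLoopB r cs = decide (∀ x ∈ r, x ∈ cs) := by
  induction cs generalizing r with
  | nil =>
      cases r with
      | nil => simp [checkLoopB, PySem.Set.len]
      | cons a t =>
          simp [checkLoopB, PySem.Set.len]
          constructor
          · intro h
            omega
          · intro h
            exact absurd rfl (h a).1
  | cons c rest ih =>
      have hne : (PySem.Set.discard r c).Nodup := by
        simpa [PySem.Set.discard] using hr.filter _
      have hmem : ∀ x, x ∈ PySem.Set.discard r c ↔ x ∈ r ∧ x ≠ c := by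
        intro x
        simp [PySem.Set.discard, List.mem_filter]
      simp only [checkLoopB]
      by_cases he : (PySem.Set.discard r c).isEmpty
      · -- early exit: discarding c emptied the set, so r ⊆ [c] ⊆ c :: rest
        have hnil : PySem.Set.discard r c = ([] : List Char) := List.isEmpty_iff.mp he
        have hall : ∀ x ∈ r, x = c ∨ x ∈ rest := by
          intro x hx
          by_cases hxc : x = c
          · exact Or.inl hxc
          · exact absurd ((hmem x).2 ⟨hx, hxc⟩) (by simp [hnil])
        simp only [he, if_true]
        symm
        simp only [decide_eq_true_iff, List.mem_cons]
        exact hall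
      · rw [if_neg he, ih _ hne]
        congr 1
        apply propext
        constructor
        · intro h x hx
          by_cases hxc : x = c
          · simp [hxc]
          · exact List.mem_cons_of_mem _ (h x ((hmem x).2 ⟨hx, hxc⟩))
        · intro h x hx
          have := h x ((hmem x).1 hx).1
          rcases List.mem_cons.mp this with h1 | h1
          · exact absurd h1 ((hmem x).1 hx).2
          · exact h1

theorem check_eq_alt (str1 str2 : String) : check str1 str2 = check_alt str1 str2 := by
  have h1 : (PySem.Set.ofList str1.toList).Nodup := PySem.Set.nodup_ofList _
  have h2 : (PySem.Set.ofList str2.toList).Nodup := PySem.Set.nodup_ofList _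
  show (if (PySem.Set.ofList str2.toList).len < (PySem.Set.ofList str1.toList).len then false
        else checkLoopA (PySem.Set.ofList str2.toList) (PySem.Set.ofList str1.toList))
      = checkLoopB (PySem.Set.ofList str1.toList) str2.toList
  rw [checkLoopB_eq _ _ h1, checkLoopA_eq]
  simp only [PySem.Set.len]
  split_ifs with hlen
  · -- |set2| < |set1| : the subset cannot hold, both sides are false
    symm
    simp only [decide_eq_false_iff_not]
    intro hsub
    have hsub2 : PySem.Set.ofList str1.toList ⊆ PySem.Set.ofList str2.toList := by
      intro x hx
      simpa [PySem.Set.mem_ofList] using hsub x hx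
    exact absurd (h1.subperm hsub2).length_le (by omega)
  · -- membership in set2 agrees with membership in str2.toList
    congr 1
    apply propext
    constructor <;> intro h x hx <;> have := h x hx <;> simpa [PySem.Set.mem_ofList] using this

-- ===== VERDICT (by name: the statement is the Claim_ definition above) =====
theorem check_spec : Claim_equal_check := by
  intro str1 str2 _
  unfold Spec_check
  exact check_eq_alt str1 str2
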